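-- pv_equiv track=rewrite | github.com/SyedNajam-Fast/ai-fraud-detection-system | src/services/schema_explainer.py | _build_layer_summaries
-- ===== SOURCE A (Python) =====
-- TABLE_LAYER = {
--     "users": "operational",
--     "transactions": "operational",
--     "predictions": "operational",
--     "fraud_alerts": "operational",
--     "kaggle_transactions": "raw_training",
--     "raw_dataset_uploads": "raw_profiling",
--     "dataset_profiles": "analytics",
--     "feature_profiles": "analytics",
--     "model_training_runs": "analytics",
--     "model_recommendations": "analytics",
--     "model_candidate_metrics": "analytics",
-- }
--
-- LAYER_DESCRIPTIONS = {
--     "operational": "Operational layer: tables used by the live fraud transaction workflow.",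
--     "raw_training": "Raw training layer: imported source data kept in a wide form for model training.",
--     "raw_profiling": "Raw profiling layer: uploaded file registration before deeper analysis.",
--     "analytics": "Analytics and audit layer: profiling results, model history, and evaluation metadata.",
-- }
--
-- def _build_layer_summaries(table_names: list[str]) -> list[str]:
--     grouped: dict[str, list[str]] = {}
--     for table_name in table_names:
--         layer = TABLE_LAYER.get(table_name, "uncategorized")
--         grouped.setdefault(layer, []).append(table_name)
--
--     summaries: list[str] = []
--     for layer_name, tables in sorted(grouped.items()):
--         layer_description = LAYER_DESCRIPTIONS.get(layer_name, f"{layer_name} layer")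
--         summaries.append(f"{layer_description} Tables: {', '.join(sorted(tables))}.")
--     return summaries
-- ===== SOURCE B (Python) =====
-- TABLE_LAYER = {
--     "users": "operational",
--     "transactions": "operational",
--     "predictions": "operational",
--     "fraud_alerts": "operational",
--     "kaggle_transactions": "raw_training",
--     "raw_dataset_uploads": "raw_profiling",
--     "dataset_profiles": "analytics",
--     "feature_profiles": "analytics",
--     "model_training_runs": "analytics",
--     "model_recommendations": "analytics",
--     "model_candidate_metrics": "analytics",
-- }
--
-- LAYER_DESCRIPTIONS = {
--     "operational": "Operational layer: tables used by the live fraud transaction workflow.",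
--     "raw_training": "Raw training layer: imported source data kept in a wide form for model training.",
--     "raw_profiling": "Raw profiling layer: uploaded file registration before deeper analysis.",
--     "analytics": "Analytics and audit layer: profiling results, model history, and evaluation metadata.",
-- }
--
--
-- def _layer_of(table_name: str) -> str:
--     return TABLE_LAYER.get(table_name, "uncategorized")
--
--
-- def _build_layer_summaries(table_names: list[str]) -> list[str]:
--     # No grouping dict at all: compute the distinct layers as a set, then for each
--     # layer (in sorted order) re-scan the input and filter its tables.
--     return [
--         f"{LAYER_DESCRIPTIONS.get(layer, f'{layer} layer')} Tables: "
--         + ", ".join(sorted(t for t in table_names if _layer_of(t) == layer))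
--         + "."
--         for layer in sorted({_layer_of(t) for t in table_names})
--     ]
-- ===== Notes on version B (the rewrite author's own statement) =====
-- stated objective: alternative
-- what changed: B drops the grouping dictionary entirely: it computes the set of distinct layers, sorts it, and for each layer re-filters the input list (a per-layer scan) instead of A's single grouping pass into a dict followed by sorted(grouped.items()).
import Mathlib
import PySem

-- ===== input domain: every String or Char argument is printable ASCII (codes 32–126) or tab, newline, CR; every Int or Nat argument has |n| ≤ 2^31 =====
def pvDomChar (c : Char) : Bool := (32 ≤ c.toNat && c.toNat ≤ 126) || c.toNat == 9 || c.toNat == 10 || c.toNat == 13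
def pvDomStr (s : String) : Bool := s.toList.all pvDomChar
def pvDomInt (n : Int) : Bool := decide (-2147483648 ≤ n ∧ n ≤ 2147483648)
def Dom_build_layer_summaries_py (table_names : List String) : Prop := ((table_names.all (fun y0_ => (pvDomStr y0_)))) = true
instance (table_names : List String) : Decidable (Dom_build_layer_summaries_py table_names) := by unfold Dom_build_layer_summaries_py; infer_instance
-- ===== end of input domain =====

-- B drops the grouping dict entirely: sorted distinct layers, then a per-layer filter of the
-- input list; return values proved equal to A's dict-grouping version (alternative decomposition).


-- module constant TABLE_LAYER
def tableLayer : PySem.Dict String String := PySem.Dict.ofList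
  [("users", "operational"),
   ("transactions", "operational"),
   ("predictions", "operational"),
   ("fraud_alerts", "operational"),
   ("kaggle_transactions", "raw_training"),
   ("raw_dataset_uploads", "raw_profiling"),
   ("dataset_profiles", "analytics"),
   ("feature_profiles", "analytics"),
   ("model_training_runs", "analytics"),
   ("model_recommendations", "analytics"),
   ("model_candidate_metrics", "analytics")]

-- module constant LAYER_DESCRIPTIONS
def layerDescriptions : PySem.Dict String String := PySem.Dict.ofList
  [("operational", "Operational layer: tables used by the live fraud transaction workflow."),
   ("raw_training", "Raw training layer: imported source data kept in a wide form for model training."),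
   ("raw_profiling", "Raw profiling layer: uploaded file registration before deeper analysis."),
   ("analytics", "Analytics and audit layer: profiling results, model history, and evaluation metadata.")]

-- TABLE_LAYER.get(table_name, "uncategorized")  (B's helper _layer_of is the same expression)
def layerOf (t : String) : String := tableLayer.getD t "uncategorized"

-- ===== PORT A =====
-- 'sorted(grouped.items())' compares (key, value) tuples; dict keys are distinct, so Python never
-- reaches the second component: sorting by the key alone is exact on every input.
def build_layer_summaries_py (table_names : List String) : List String :=
  -- grouped.setdefault(layer, []).append(t)  ≡  grouped[layer] = grouped.get(layer, []) + [t]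
  let grouped : PySem.Dict String (List String) :=
    table_names.foldl (fun d t => d.modify (layerOf t) [] (fun ts => ts ++ [t])) PySem.Dict.empty
  (PySem.List.sorted grouped.items (fun p => p.1) false).foldl
    (fun acc p =>
      acc ++ [layerDescriptions.getD p.1 (p.1 ++ " layer") ++ " Tables: " ++
        PySem.Str.join ", " (PySem.List.sorted p.2 (fun x => x) false) ++ "."]) []

-- ===== PORT B =====
def build_layer_summaries_py_alt (table_names : List String) : List String :=
  -- sorted({_layer_of(t) for t in table_names}) : set comprehension then sort
  (PySem.List.sorted (PySem.Set.ofList (table_names.map layerOf)) (fun x => x) false).map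
    (fun layer => layerDescriptions.getD layer (layer ++ " layer") ++ " Tables: " ++
      PySem.Str.join ", "
        (PySem.List.sorted (table_names.filter (fun t => layerOf t == layer)) (fun x => x) false)
      ++ ".")

-- ===== PRECONDITION & SPEC =====
def Spec_build_layer_summaries_py (table_names : List String) (out : List String) : Prop := out = build_layer_summaries_py_alt table_names
instance (table_names : List String) (out : List String) : Decidable (Spec_build_layer_summaries_py table_names out) := by unfold Spec_build_layer_summaries_py; infer_instance

-- ===== CLAIM (what is proved, stated in full; the proofs are below) =====
def Claim_equal_build_layer_summaries_py : Prop := ∀ (table_names : List String), Dom_build_layer_summaries_py table_names → Spec_build_layer_summaries_py table_names (build_layer_summaries_py table_names)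

-- ===== LEMMAS AND PROOFS =====

-- the grouping fold: value at key k is the sublist of l whose layer is k
theorem gd_getD (l : List String) (k : String) :
    (l.foldl (fun d t => d.modify (layerOf t) [] (fun ts => ts ++ [t])) PySem.Dict.empty).getD k []
      = l.filter (fun t => layerOf t == k) := by
  have h : l.foldl (fun d t => d.modify (layerOf t) [] (fun ts => ts ++ [t])) PySem.Dict.empty
      = (l.map (fun t => (layerOf t, t))).foldl
          (fun d p => d.modify p.1 [] (fun ts => ts ++ [p.2])) PySem.Dict.empty := by
    rw [List.foldl_map]
  rw [h, PySem.Dict.getD_foldl_modify_append]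
  simp [List.filter_map, Function.comp_def, List.map_map]

-- the grouping fold: keys are the distinct layers in first-occurrence order
theorem gd_keys (l : List String) :
    (l.foldl (fun d t => d.modify (layerOf t) [] (fun ts => ts ++ [t])) PySem.Dict.empty).keys
      = PySem.Set.ofList (l.map layerOf) := by
  rw [PySem.Dict.keys_foldl_modify_key]
  simp [PySem.Dict.keys_empty, PySem.Set.update_nil_left]

theorem gd_nodup (l : List String) :
    (l.foldl (fun d t => d.modify (layerOf t) [] (fun ts => ts ++ [t])) PySem.Dict.empty).keys.Nodup := by
  rw [gd_keys]; exact PySem.Set.nodup_ofList _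

theorem build_layer_summaries_py_spec : Claim_equal_build_layer_summaries_py := by
  intro l _
  unfold Spec_build_layer_summaries_py build_layer_summaries_py build_layer_summaries_py_alt
  set dA := l.foldl (fun d t => d.modify (layerOf t) [] (fun ts => ts ++ [t])) PySem.Dict.empty with hdA
  -- A's sorted items are the sorted keys paired with their values
  have hsortedK_nodup : (PySem.List.sorted dA.keys (fun x => x) false).Nodup :=
    (PySem.List.sorted_perm dA.keys (fun x => x) false).nodup_iff.mpr (gd_nodup l)
  have hitems : PySem.List.sorted dA.items (fun p => p.1) false
      = (PySem.List.sorted dA.keys (fun x => x) false).map (fun k => (k, dA.getD k [])) := by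
    apply PySem.List.sorted_eq_of_perm_of_pairwise_lt
    · rw [PySem.Dict.items_eq_map_keys dA (gd_nodup l) []]
      exact (PySem.List.sorted_perm dA.keys (fun x => x) false).map _
    · rw [List.pairwise_map]
      have hle := PySem.List.sorted_pairwise dA.keys (fun x => x)
      exact (hle.and hsortedK_nodup).imp (fun h => lt_of_le_of_ne h.1 h.2)
  rw [PySem.List.foldl_append_singleton_eq_map, hitems, List.map_map, gd_keys]
  simp only [List.nil_append]
  apply List.map_congr_left
  intro k _
  simp only [Function.comp]
  rw [hdA, gd_getD]
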